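-- pv_equiv track=rewrite | github.com/yh20studio/Algorithm-problem-solving | python/programmers/lv.2/프린터.py | solution
-- ===== SOURCE A (Python) =====
-- from collections import deque
--
-- def solution(priorities, location):
--     answer = []
--     dic = {}
--     queue = deque()
--
--     for i in range(len(priorities)):
--         priority = priorities[i]
--         queue.append(i)
--         if priority in dic.keys():
--             dic[priority].append(i)
--         else:
--             dic[priority] = [i]
--
--     while queue:
--         index = queue.popleft()
--         priority = priorities[index]
--
--         is_to_back = False
--         for key in dic.keys():
--             if priority < key:
--                 is_to_back = True
--
--         # 나머지 인쇄 대기목록에서 J보다 중요도가 높은 문서가 한 개라도 존재하면 J를 대기목록의 가장 마지막에 넣습니다.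
--         if is_to_back:
--             queue.append(index)
--         else:
--             answer.append(index)
--
--             if len(dic[priority]) > 1:
--                 dic[priority].remove(index)
--             else:
--                 del(dic[priority])
--
--
--     return answer.index(location) + 1
-- ===== SOURCE B (Python) =====
-- def solution(priorities, location):
--     # Rotate-to-front-of-next-max simulation: instead of requeueing documents
--     # one by one with a priority dictionary, jump straight to the first document
--     # of maximal remaining priority, print it, and continue on the rotated rest.
--     queue = list(enumerate(priorities))
--     rank = 0
--     while True:
--         top = max(p for _, p in queue)
--         j = next(k for k, (_, p) in enumerate(queue) if p == top)
--         rank += 1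
--         if queue[j][0] == location:
--             return rank
--         queue = queue[j + 1:] + queue[:j]
-- ===== Notes on version B (the rewrite author's own statement) =====
-- stated objective: faster
-- what changed: A simulates the printer by dequeuing one document at a time, requeueing it if a dictionary of remaining priorities holds a higher key, collecting the printed indices and finally calling answer.index(location); B keeps (index, priority) pairs, jumps in each round straight to the first document of maximal remaining priority via max/next, rotates the rest with two slices, and returns a running rank counter as soon as the target prints.
import Mathlib
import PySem

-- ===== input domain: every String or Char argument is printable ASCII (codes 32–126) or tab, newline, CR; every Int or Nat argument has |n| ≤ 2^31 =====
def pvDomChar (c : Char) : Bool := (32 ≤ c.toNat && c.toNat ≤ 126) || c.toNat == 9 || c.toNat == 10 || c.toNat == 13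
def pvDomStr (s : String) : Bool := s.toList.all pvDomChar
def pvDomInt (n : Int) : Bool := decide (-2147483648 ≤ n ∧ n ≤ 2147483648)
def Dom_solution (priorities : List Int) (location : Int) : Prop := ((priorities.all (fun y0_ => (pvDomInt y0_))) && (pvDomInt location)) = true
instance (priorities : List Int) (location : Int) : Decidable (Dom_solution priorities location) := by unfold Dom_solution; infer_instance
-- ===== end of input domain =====

-- B replaces A's one-document-at-a-time requeue simulation (with its priority
-- dictionary and final answer.index) by jumping directly to the first document of
-- maximal remaining priority in each round: one round per printed document instead
-- of one queue step per requeue and a dictionary scan per step (measured faster).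

-- ===== PORT A =====
-- priorities[index]: every index either program reads is in range (indices come
-- from range(len(priorities))), so pyGetD's default is never used.
def priAt (priorities : List Int) (i : Int) : Int := PySem.List.pyGetD priorities i 0

-- the first for-loop: builds queue = [0..n-1] and dic[priority] = list of indices
def solBuild (priorities : List Int) : List Int × PySem.Dict Int (List Int) :=
  (PySem.List.pyRange 0 (priorities.length : Int)).foldl
    (fun st i =>
      let priority := priAt priorities i
      ( st.1 ++ [i],
        if st.2.contains priority then st.2.modify priority [] (fun l => l ++ [i])
        else st.2.insert priority [i] ))
    ([], PySem.Dict.empty)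

-- the while-loop; fuel only makes the recursion structural (never exhausted with
-- the fuel solution passes).  dic[priority].remove(index) always succeeds in the
-- Python, so remove?'s none-fallback is never taken.
def solLoop (priorities : List Int) : Nat → List Int → PySem.Dict Int (List Int) → List Int → List Int
  | 0, _, _, answer => answer
  | _ + 1, [], _, answer => answer
  | fuel + 1, index :: queue, dic, answer =>
    let priority := priAt priorities index
    let is_to_back := dic.keys.foldl (fun b key => if priority < key then true else b) false
    if is_to_back then solLoop priorities fuel (queue ++ [index]) dic answer
    else
      let dic' := if 1 < (dic.getD priority []).length
        then dic.modify priority [] (fun l => (PySem.List.remove? l index).getD l)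
        else dic.erase priority
      solLoop priorities fuel queue dic' (answer ++ [index])

def solution (priorities : List Int) (location : Int) : Int :=
  let st := solBuild priorities
  -- the while-loop runs at most (n+1)^2 iterations (each element is printed within
  -- one pass over the queue), so this fuel is never exhausted
  let answer := solLoop priorities ((priorities.length + 1) * (priorities.length + 1)) st.1 st.2 []
  match PySem.List.index? answer location with
  | some k => (k : Int) + 1
  | none => 0   -- Python raises ValueError here; excluded by Pre_solution

-- ===== PORT B =====
-- B's while-loop; one document is printed per iteration, so n+1 fuel is never
-- exhausted when location is a valid index.  queue[j] is always in range (j is the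
-- position of the first maximal element), so pyGetD's default is never used.
def altLoop (location : Int) : Nat → List (Int × Int) → Int → Int
  | 0, _, rank => rank
  | fuel + 1, queue, rank =>
    let top := (PySem.List.max? (queue.map (·.2)) (fun p => p)).getD 0
    let j := queue.findIdx (fun ip => ip.2 == top)
    let rank' := rank + 1
    if (PySem.List.pyGetD queue (j : Int) (0, 0)).1 == location then rank'
    else altLoop location fuel
      (PySem.List.slice queue (some ((j : Int) + 1)) none ++ PySem.List.slice queue none (some (j : Int)))
      rank'

def solution_alt (priorities : List Int) (location : Int) : Int :=
  altLoop location (priorities.length + 1) (PySem.List.enumerate priorities) 0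

-- ===== PRECONDITION & SPEC =====
-- Pre_ excludes exactly the inputs where the Python A raises ValueError
-- (location is not one of the indices 0..len(priorities)-1, so answer.index fails).
def Pre_solution (priorities : List Int) (location : Int) : Prop :=
  0 ≤ location ∧ location < priorities.length
instance (priorities : List Int) (location : Int) : Decidable (Pre_solution priorities location) := by
  unfold Pre_solution; infer_instance

def pvWitness_solution : List Int × Int := ([2, 1, 3, 2], 2)

def Spec_solution (priorities : List Int) (location : Int) (out : Int) : Prop := out = solution_alt priorities location
instance (priorities : List Int) (location : Int) (out : Int) : Decidable (Spec_solution priorities location out) := by unfold Spec_solution; infer_instance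

-- ===== CLAIM (what is proved, stated in full; the proofs are below) =====
def Claim_equal_solution : Prop := ∀ (priorities : List Int) (location : Int), Dom_solution priorities location → Pre_solution priorities location → Spec_solution priorities location (solution priorities location)

-- ===== LEMMAS AND PROOFS =====

-- the reference print order: repeatedly print the first document of maximal
-- remaining priority, then continue on the rotated rest (used at fuel = q.length)
def printOrderF (priorities : List Int) : Nat → List Int → List Int
  | 0, _ => []
  | _ + 1, [] => []
  | fuel + 1, i :: t =>
    let q := i :: t
    let m := (PySem.List.max? (q.map (priAt priorities)) (fun p => p)).getD 0
    let j := q.findIdx (fun x => priAt priorities x == m)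
    q.getD j 0 :: printOrderF priorities fuel (q.drop (j + 1) ++ q.take j)

def mTop (priorities : List Int) (q : List Int) : Int :=
  (PySem.List.max? (q.map (priAt priorities)) (fun p => p)).getD 0

def jIdx (priorities : List Int) (q : List Int) : Nat :=
  q.findIdx (fun x => priAt priorities x == mTop priorities q)

-- A's loop invariant: dic's keys are exactly the priorities still in the queue,
-- and dic[p] holds exactly the queued indices of priority p
def AInv (priorities : List Int) (q : List Int) (dic : PySem.Dict Int (List Int)) : Prop :=
  q.Nodup ∧
  (∀ p : Int, p ∈ dic.keys ↔ ∃ i ∈ q, priAt priorities i = p) ∧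
  (∀ p : Int, (dic.getD p []).Nodup ∧ ∀ i : Int, i ∈ dic.getD p [] ↔ i ∈ q ∧ priAt priorities i = p)

lemma foldl_ite_or (l : List Int) (c : Int) (b : Bool) :
    l.foldl (fun b key => if c < key then true else b) b = (b || l.any fun key => decide (c < key)) := by
  simpa using PySem.List.foldl_if_true_eq (fun key => decide (c < key)) l b

lemma find_filter {ν : Type} (k k' : Int) : ∀ (items : List (Int × ν)),
  List.find? (fun p => p.1 == k') (items.filter (fun p => !(p.1 == k)))
    = if k' = k then none else List.find? (fun p => p.1 == k') items := by
  intro items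
  induction items with
  | nil => simp
  | cons p rest ih =>
    by_cases hp : p.1 = k
    · have hpk : (p.1 == k) = true := by simpa using hp
      by_cases hk : k' = k
      · simp [hpk, hk, ih]
      · have hpk' : (p.1 == k') = false := by simp [hp]; intro h; exact hk h.symm
        simp [hpk, hpk', ih, hk]
    · have hpk : (p.1 == k) = false := by simpa using hp
      by_cases hk : k' = k
      · have hpk' : (p.1 == k') = false := by simp [hk]; exact hp
        simp [List.filter_cons, List.find?_cons, hpk, hpk', ih, hk]
      · by_cases hpk' : p.1 = k'
        · simp [List.filter_cons, List.find?_cons, hpk, hpk', ih, hk]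
        · have h2 : (p.1 == k') = false := by simpa using hpk'
          simp [List.filter_cons, List.find?_cons, hpk, h2, ih, hk]

lemma dict_get?_erase {ν : Type} (d : PySem.Dict Int ν) (k k' : Int) :
    (d.erase k).get? k' = if k' = k then none else d.get? k' := by
  obtain ⟨items⟩ := d
  simp only [PySem.Dict.erase, PySem.Dict.get?, find_filter]
  split <;> rfl

lemma dict_getD_erase {ν : Type} (d : PySem.Dict Int ν) (k k' : Int) (d0 : ν) :
    (d.erase k).getD k' d0 = if k' = k then d0 else d.getD k' d0 := by
  rw [PySem.Dict.getD_eq_get?_getD, PySem.Dict.getD_eq_get?_getD, dict_get?_erase]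
  split <;> rfl

lemma dict_mem_keys_erase {ν : Type} (d : PySem.Dict Int ν) (k k' : Int) :
    k' ∈ (d.erase k).keys ↔ k' ∈ d.keys ∧ k' ≠ k := by
  obtain ⟨items⟩ := d
  simp [PySem.Dict.erase, PySem.Dict.keys, List.mem_filter]
  try tauto

lemma mTop_eq_some (priorities : List Int) (q : List Int) (h : q ≠ []) :
    PySem.List.max? (q.map (priAt priorities)) (fun p => p) = some (mTop priorities q) := by
  rcases ho : PySem.List.max? (q.map (priAt priorities)) (fun p => p) with _ | m
  · rw [PySem.List.max?_eq_none_iff] at ho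
    simp [List.map_eq_nil_iff] at ho
    exact absurd ho h
  · simp [mTop, ho]

lemma mTop_max (priorities : List Int) (q : List Int) (h : q ≠ []) :
    ∀ x ∈ q, priAt priorities x ≤ mTop priorities q := by
  intro x hx
  have := PySem.List.max?_isMax (mTop_eq_some priorities q h)
  exact this _ (List.mem_map_of_mem hx)

lemma mTop_attained (priorities : List Int) (q : List Int) (h : q ≠ []) :
    ∃ x ∈ q, priAt priorities x = mTop priorities q := by
  have := PySem.List.max?_mem (mTop_eq_some priorities q h)
  simpa [List.mem_map] using this

lemma jIdx_lt (priorities : List Int) (q : List Int) (h : q ≠ []) :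
    jIdx priorities q < q.length := by
  rw [jIdx, List.findIdx_lt_length]
  obtain ⟨x, hx, he⟩ := mTop_attained priorities q h
  exact ⟨x, hx, by simpa using he⟩

lemma pri_jIdx (priorities : List Int) (q : List Int) (h : q ≠ []) :
    priAt priorities (q.getD (jIdx priorities q) 0) = mTop priorities q := by
  have hlt := jIdx_lt priorities q h
  rw [List.getD_eq_getElem _ _ hlt]
  have := List.findIdx_getElem (w := hlt)
  simpa using this

lemma pri_take_lt (priorities : List Int) (q : List Int) (h : q ≠ []) :
    ∀ x ∈ q.take (jIdx priorities q), priAt priorities x < mTop priorities q := by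
  intro x hx
  rw [List.mem_take_iff_getElem] at hx
  obtain ⟨k, hk, rfl⟩ := hx
  have hk' : k < jIdx priorities q := by
    have := jIdx_lt priorities q h; omega
  have hne := List.not_of_lt_findIdx hk'
  simp only [beq_eq_false_iff_ne, ne_eq] at hne
  have hle := mTop_max priorities q h q[k] (List.getElem_mem _)
  omega

lemma q_decomp (priorities : List Int) (q : List Int) (h : q ≠ []) :
    q = q.take (jIdx priorities q) ++ q.getD (jIdx priorities q) 0 :: q.drop (jIdx priorities q + 1) := by
  have hlt := jIdx_lt priorities q h
  rw [List.getD_eq_getElem _ _ hlt, List.getElem_cons_drop, List.take_append_drop]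

lemma perm_rot (priorities : List Int) (q : List Int) (h : q ≠ []) :
    q.Perm (q.getD (jIdx priorities q) 0 :: (q.drop (jIdx priorities q + 1) ++ q.take (jIdx priorities q))) := by
  conv_lhs => rw [q_decomp priorities q h]
  exact List.perm_middle.trans (List.Perm.cons _ List.perm_append_comm)

lemma rot_length (priorities : List Int) (q : List Int) (h : q ≠ []) :
    (q.drop (jIdx priorities q + 1) ++ q.take (jIdx priorities q)).length = q.length - 1 := by
  have hlt := jIdx_lt priorities q h
  simp [List.length_drop, List.length_take]
  omega

lemma printOrderF_cons (priorities : List Int) (fuel : Nat) (q : List Int) (h : q ≠ []) :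
    printOrderF priorities (fuel + 1) q
      = q.getD (jIdx priorities q) 0
        :: printOrderF priorities fuel (q.drop (jIdx priorities q + 1) ++ q.take (jIdx priorities q)) := by
  cases q with
  | nil => exact absurd rfl h
  | cons i t => rfl

lemma AInv_perm (priorities : List Int) {q q' : List Int} (dic : PySem.Dict Int (List Int))
    (hp : q.Perm q') (h : AInv priorities q dic) : AInv priorities q' dic := by
  obtain ⟨h1, h2, h3⟩ := h
  refine ⟨hp.nodup h1, fun p => ?_, fun p => ⟨(h3 p).1, fun i => ?_⟩⟩
  · rw [h2]
    constructor <;> rintro ⟨i, hi, he⟩ <;> exact ⟨i, by first | exact ⟨hp.mem_iff.mp hi, he⟩ | exact ⟨hp.mem_iff.mpr hi, he⟩⟩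
  · rw [(h3 p).2, hp.mem_iff]

lemma AInv_step (priorities : List Int) (c : Int) (rest : List Int) (dic : PySem.Dict Int (List Int))
    (h : AInv priorities (c :: rest) dic) :
    AInv priorities rest
      (if 1 < (dic.getD (priAt priorities c) []).length
        then dic.modify (priAt priorities c) [] (fun l => (PySem.List.remove? l c).getD l)
        else dic.erase (priAt priorities c)) := by
  obtain ⟨h1, h2, h3⟩ := h
  rw [List.nodup_cons] at h1
  obtain ⟨hcrest, hrestnd⟩ := h1
  set p0 := priAt priorities c with hp0
  set l := dic.getD p0 [] with hl
  have hcl : c ∈ l := ((h3 p0).2 c).mpr ⟨List.mem_cons_self, rfl⟩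
  have hlnd : l.Nodup := (h3 p0).1
  have shift : ∀ p, p ≠ p0 → ∀ i : Int, (i ∈ c :: rest ∧ priAt priorities i = p) ↔ (i ∈ rest ∧ priAt priorities i = p) := by
    intro p hp i
    constructor
    · rintro ⟨hi, he⟩
      rcases List.mem_cons.mp hi with rfl | hi'
      · exact absurd he.symm (by simpa using hp)
      · exact ⟨hi', he⟩
    · rintro ⟨hi, he⟩; exact ⟨List.mem_cons_of_mem _ hi, he⟩
  have honly : ∀ i : Int, i ∈ rest ∧ priAt priorities i = p0 → i ∈ l ∧ i ≠ c := by
    intro i ⟨hi, he⟩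
    refine ⟨((h3 p0).2 i).mpr ⟨List.mem_cons_of_mem _ hi, he⟩, fun hic => hcrest (hic ▸ hi)⟩
  by_cases hlen : 1 < l.length
  · rw [if_pos hlen]
    have hrem : PySem.List.remove? l c = some (l.erase c) := PySem.List.remove?_eq_some_erase l c hcl
    have hex : ∃ i ∈ rest, priAt priorities i = p0 := by
      have hlenerase : (l.erase c).length = l.length - 1 := List.length_erase_of_mem hcl
      have hne : l.erase c ≠ [] := by
        intro hnil; rw [hnil] at hlenerase; simp at hlenerase; omega
      obtain ⟨d, hd⟩ := List.exists_mem_of_ne_nil _ hne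
      have hd' := (List.Nodup.mem_erase_iff hlnd).mp hd
      have hmem := ((h3 p0).2 d).mp hd'.2
      rcases List.mem_cons.mp hmem.1 with rfl | hdr
      · exact absurd rfl hd'.1
      · exact ⟨d, hdr, hmem.2⟩
    refine ⟨hrestnd, fun p => ?_, fun p => ?_⟩
    · rw [PySem.Dict.keys_modify, PySem.Dict.mem_keys_insert]
      by_cases hp : p = p0
      · subst hp
        exact ⟨fun _ => hex, fun _ => Or.inl rfl⟩
      · rw [h2]
        constructor
        · rintro (rfl | ⟨i, hi, he⟩)
          · exact absurd rfl hp
          · exact ⟨i, (shift p hp i).mp ⟨hi, he⟩⟩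
        · rintro ⟨i, hi, he⟩
          exact Or.inr ⟨i, List.mem_cons_of_mem _ hi, he⟩
    · rw [PySem.Dict.getD_modify]
      by_cases hp : p = p0
      · subst hp
        rw [if_pos rfl, ← hl, hrem]
        refine ⟨hlnd.erase c, fun i => ?_⟩
        simp only [Option.getD_some]
        rw [List.Nodup.mem_erase_iff hlnd, (h3 p0).2 i]
        constructor
        · rintro ⟨hic, hi, he⟩
          rcases List.mem_cons.mp hi with rfl | hi'
          · exact absurd rfl hic
          · exact ⟨hi', he⟩
        · rintro ⟨hi, he⟩
          exact ⟨fun hic => hcrest (hic ▸ hi), List.mem_cons_of_mem _ hi, he⟩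
      · rw [if_neg hp]
        refine ⟨(h3 p).1, fun i => ?_⟩
        rw [(h3 p).2 i]
        exact shift p hp i
  · rw [if_neg hlen]
    have hlc : l = [c] := by
      cases hml : l with
      | nil => rw [hml] at hcl; simp at hcl
      | cons a t =>
        cases t with
        | nil => rw [hml] at hcl; simp at hcl; rw [hcl]
        | cons b t2 => rw [hml] at hlen; simp at hlen
    refine ⟨hrestnd, fun p => ?_, fun p => ?_⟩
    · rw [dict_mem_keys_erase]
      by_cases hp : p = p0
      · subst hp
        simp only [ne_eq, not_true_eq_false, and_false, false_iff]
        rintro ⟨i, hi, he⟩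
        have := honly i ⟨hi, he⟩
        rw [hlc] at this
        simp at this
      · rw [h2]
        constructor
        · rintro ⟨⟨i, hi, he⟩, -⟩
          exact ⟨i, (shift p hp i).mp ⟨hi, he⟩⟩
        · rintro ⟨i, hi, he⟩
          exact ⟨⟨i, List.mem_cons_of_mem _ hi, he⟩, hp⟩
    · rw [dict_getD_erase]
      by_cases hp : p = p0
      · subst hp
        rw [if_pos rfl]
        refine ⟨List.nodup_nil, fun i => ?_⟩
        simp only [List.not_mem_nil, false_iff]
        rintro ⟨hi, he⟩
        have := honly i ⟨hi, he⟩
        rw [hlc] at this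
        simp at this
      · rw [if_neg hp]
        refine ⟨(h3 p).1, fun i => ?_⟩
        rw [(h3 p).2 i]
        exact shift p hp i

lemma solLoop_rotate (priorities : List Int) (dic : PySem.Dict Int (List Int))
    (answer : List Int) : ∀ (q1 : List Int),
    (∀ i ∈ q1, ∃ key ∈ dic.keys, priAt priorities i < key) → ∀ (q2 : List Int) (fuel : Nat),
    solLoop priorities (q1.length + fuel) (q1 ++ q2) dic answer
      = solLoop priorities fuel (q2 ++ q1) dic answer := by
  intro q1
  induction q1 with
  | nil => intro _ q2 fuel; simp
  | cons hd tl ih =>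
    intro h q2 fuel
    have harith : (hd :: tl).length + fuel = (tl.length + fuel) + 1 := by
      simp [List.length_cons]; omega
    rw [harith]
    show solLoop priorities ((tl.length + fuel) + 1) (hd :: (tl ++ q2)) dic answer = _
    rw [solLoop]
    obtain ⟨key, hk, hlt⟩ := h hd List.mem_cons_self
    have hany : (dic.keys.foldl (fun b key => if priAt priorities hd < key then true else b) false) = true := by
      rw [foldl_ite_or]
      simp only [Bool.false_or, List.any_eq_true]
      exact ⟨key, hk, by simpa using hlt⟩
    simp only [hany, if_true]
    have hassoc : (tl ++ q2) ++ [hd] = tl ++ (q2 ++ [hd]) := by simp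
    rw [hassoc, ih (fun i hi => h i (List.mem_cons_of_mem _ hi)) (q2 ++ [hd]) fuel]
    congr 1
    simp

lemma solLoop_eq (priorities : List Int) : ∀ (n : Nat) (q : List Int) (dic : PySem.Dict Int (List Int))
    (answer : List Int) (fuel : Nat), q.length = n → AInv priorities q dic → n * n ≤ fuel →
    solLoop priorities fuel q dic answer = answer ++ printOrderF priorities n q := by
  intro n
  induction n using Nat.strong_induction_on with
  | _ n ih =>
    match n with
    | 0 =>
      intro q dic answer fuel hlen hinv hfuel
      have hq : q = [] := List.length_eq_zero_iff.mp hlen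
      subst hq
      cases fuel <;> simp [solLoop, printOrderF]
    | N + 1 =>
      intro q dic answer fuel hlen hinv hfuel
      have hne : q ≠ [] := by intro hq; rw [hq] at hlen; simp at hlen
      have hjlt : jIdx priorities q < q.length := jIdx_lt _ _ hne
      set j := jIdx priorities q with hj
      set c := q.getD j 0 with hc
      set rot := q.drop (j + 1) ++ q.take j with hrot
      have htklen : (q.take j).length = j := by
        rw [List.length_take]; omega
      have hsq : (N + 1) * (N + 1) = N * N + 2 * N + 1 := by ring
      obtain ⟨fuel', hfe, hf'⟩ : ∃ f', fuel = j + (f' + 1) ∧ N * N ≤ f' :=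
        ⟨fuel - j - 1, by omega, by omega⟩
      have hmkey : mTop priorities q ∈ dic.keys := by
        obtain ⟨x, hx, he⟩ := mTop_attained priorities q hne
        exact (hinv.2.1 _).mpr ⟨x, hx, he⟩
      -- rotate the leading non-maximal documents to the back
      have hrstep := solLoop_rotate priorities dic answer (q.take j)
        (fun i hi => ⟨mTop priorities q, hmkey, pri_take_lt priorities q hne i hi⟩)
        (c :: q.drop (j + 1)) (fuel' + 1)
      rw [htklen] at hrstep
      have hq2 : q.take j ++ (c :: q.drop (j + 1)) = q := (q_decomp priorities q hne).symm
      rw [hq2] at hrstep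
      rw [hfe, hrstep]
      have hcrot : (c :: q.drop (j + 1)) ++ q.take j = c :: rot := by rw [List.cons_append, ← hrot]
      rw [hcrot, solLoop]
      have hpric : priAt priorities c = mTop priorities q := pri_jIdx priorities q hne
      have hnoback : (dic.keys.foldl (fun b key => if priAt priorities c < key then true else b) false) = false := by
        rw [foldl_ite_or]
        simp only [Bool.false_or, List.any_eq_false]
        intro key hk
        obtain ⟨x, hx, he⟩ := (hinv.2.1 key).mp hk
        have := mTop_max priorities q hne x hx
        simp only [decide_eq_true_eq]
        omega
      simp only [hnoback, Bool.false_eq_true, if_false]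
      have hinvrot : AInv priorities (c :: rot) dic :=
        AInv_perm priorities dic (perm_rot priorities q hne) hinv
      have hinv' := AInv_step priorities c rot dic hinvrot
      have hrotlen : rot.length = N := by
        have := rot_length priorities q hne; rw [← hrot] at this; omega
      rw [ih N (by omega) rot _ (answer ++ [c]) fuel' hrotlen hinv' hf']
      rw [printOrderF_cons priorities N q hne]
      simp only [← hj, ← hc, ← hrot]
      simp

lemma printOrderF_perm (priorities : List Int) : ∀ (n : Nat) (q : List Int), q.length = n →
    (printOrderF priorities n q).Perm q := by
  intro n
  induction n using Nat.strong_induction_on with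
  | _ n ih =>
    match n with
    | 0 =>
      intro q hlen
      rw [List.length_eq_zero_iff.mp hlen]
      simp [printOrderF]
    | N + 1 =>
      intro q hlen
      have hne : q ≠ [] := by intro hq; rw [hq] at hlen; simp at hlen
      rw [printOrderF_cons priorities N q hne]
      have hrotlen : (q.drop (jIdx priorities q + 1) ++ q.take (jIdx priorities q)).length = N := by
        have := rot_length priorities q hne; omega
      exact ((ih N (by omega) _ hrotlen).cons _).trans (perm_rot priorities q hne).symm

lemma AInv_build_step (priorities : List Int) (x : Int) (q : List Int)
    (dic : PySem.Dict Int (List Int)) (hinv : AInv priorities q dic) (hxq : x ∉ q) :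
    AInv priorities (q ++ [x])
      (if dic.contains (priAt priorities x)
        then dic.modify (priAt priorities x) [] (fun l => l ++ [x])
        else dic.insert (priAt priorities x) [x]) := by
  obtain ⟨h1, h2, h3⟩ := hinv
  set p0 := priAt priorities x with hp0
  have hnd' : (q ++ [x]).Nodup := by
    simp [List.nodup_append, h1]
    intro a ha hax
    exact hxq (hax ▸ ha)
  have shift : ∀ p, p ≠ p0 → ∀ i : Int, (i ∈ q ++ [x] ∧ priAt priorities i = p) ↔ (i ∈ q ∧ priAt priorities i = p) := by
    intro p hp i
    constructor
    · rintro ⟨hi, he⟩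
      rcases List.mem_append.mp hi with hi' | hi'
      · exact ⟨hi', he⟩
      · rw [List.mem_singleton] at hi'
        subst hi'
        exact absurd he.symm (by simpa using hp)
    · rintro ⟨hi, he⟩; exact ⟨List.mem_append_left _ hi, he⟩
  by_cases hcont : dic.contains p0 = true
  · rw [if_pos hcont]
    refine ⟨hnd', fun p => ?_, fun p => ?_⟩
    · rw [PySem.Dict.keys_modify, PySem.Dict.mem_keys_insert]
      by_cases hp : p = p0
      · subst hp
        exact ⟨fun _ => ⟨x, List.mem_append_right _ (List.mem_singleton.mpr rfl), rfl⟩,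
          fun _ => Or.inl rfl⟩
      · rw [h2]
        constructor
        · rintro (rfl | ⟨i, hi, he⟩)
          · exact absurd rfl hp
          · exact ⟨i, List.mem_append_left _ hi, he⟩
        · rintro ⟨i, hi, he⟩
          exact Or.inr ⟨i, ((shift p hp i).mp ⟨hi, he⟩)⟩
    · rw [PySem.Dict.getD_modify]
      by_cases hp : p = p0
      · subst hp
        rw [if_pos rfl]
        have hxl : x ∉ dic.getD p0 [] := fun hx => hxq (((h3 p0).2 x).mp hx).1
        refine ⟨by simp [List.nodup_append, (h3 p0).1]; intro a ha hax; exact hxl (hax ▸ ha), fun i => ?_⟩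
        rw [List.mem_append, List.mem_singleton, (h3 p0).2 i]
        constructor
        · rintro (⟨hi, he⟩ | rfl)
          · exact ⟨List.mem_append_left _ hi, he⟩
          · exact ⟨List.mem_append_right _ (List.mem_singleton.mpr rfl), rfl⟩
        · rintro ⟨hi, he⟩
          rcases List.mem_append.mp hi with hi' | hi'
          · exact Or.inl ⟨hi', he⟩
          · exact Or.inr (List.mem_singleton.mp hi')
      · rw [if_neg hp]
        refine ⟨(h3 p).1, fun i => ?_⟩
        rw [(h3 p).2 i]
        exact (shift p hp i).symm
  · rw [if_neg hcont]
    have hcont' : dic.contains p0 = false := by simpa using hcont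
    have hkeys0 : p0 ∉ dic.keys := fun hk => hcont ((PySem.Dict.contains_iff_mem_keys dic p0).mpr hk)
    have hnoq : ∀ i ∈ q, priAt priorities i ≠ p0 := by
      intro i hi he
      exact hkeys0 ((h2 p0).mpr ⟨i, hi, he⟩)
    refine ⟨hnd', fun p => ?_, fun p => ?_⟩
    · rw [PySem.Dict.mem_keys_insert]
      by_cases hp : p = p0
      · subst hp
        exact ⟨fun _ => ⟨x, List.mem_append_right _ (List.mem_singleton.mpr rfl), rfl⟩,
          fun _ => Or.inl rfl⟩
      · rw [h2]
        constructor
        · rintro (rfl | ⟨i, hi, he⟩)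
          · exact absurd rfl hp
          · exact ⟨i, List.mem_append_left _ hi, he⟩
        · rintro ⟨i, hi, he⟩
          exact Or.inr ⟨i, ((shift p hp i).mp ⟨hi, he⟩)⟩
    · rw [PySem.Dict.getD_insert]
      by_cases hp : p = p0
      · subst hp
        rw [if_pos rfl]
        refine ⟨List.nodup_singleton x, fun i => ?_⟩
        rw [List.mem_singleton]
        constructor
        · rintro rfl
          exact ⟨List.mem_append_right _ (List.mem_singleton.mpr rfl), rfl⟩
        · rintro ⟨hi, he⟩
          rcases List.mem_append.mp hi with hi' | hi'
          · exact absurd he (hnoq i hi')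
          · exact List.mem_singleton.mp hi'
      · rw [if_neg hp]
        refine ⟨(h3 p).1, fun i => ?_⟩
        rw [(h3 p).2 i]
        exact (shift p hp i).symm

lemma build_fold_inv (priorities : List Int) : ∀ (xs q : List Int) (dic : PySem.Dict Int (List Int)),
    AInv priorities q dic → (∀ x ∈ xs, x ∉ q) → xs.Nodup →
    (xs.foldl (fun st i =>
        let priority := priAt priorities i
        ( st.1 ++ [i],
          if st.2.contains priority then st.2.modify priority [] (fun l => l ++ [i])
          else st.2.insert priority [i] )) (q, dic)).1 = q ++ xs ∧
    AInv priorities (q ++ xs)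
      (xs.foldl (fun st i =>
        let priority := priAt priorities i
        ( st.1 ++ [i],
          if st.2.contains priority then st.2.modify priority [] (fun l => l ++ [i])
          else st.2.insert priority [i] )) (q, dic)).2 := by
  intro xs
  induction xs with
  | nil =>
    intro q dic hinv _ _
    simpa using hinv
  | cons x t ih =>
    intro q dic hinv hfresh hnd
    simp only [List.foldl_cons]
    have hxq : x ∉ q := hfresh x List.mem_cons_self
    have hinv' := AInv_build_step priorities x q dic hinv hxq
    have hfresh' : ∀ y ∈ t, y ∉ q ++ [x] := by
      intro y hy
      rw [List.mem_append, List.mem_singleton]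
      rintro (h1 | rfl)
      · exact hfresh y (List.mem_cons_of_mem _ hy) h1
      · exact (List.nodup_cons.mp hnd).1 hy
    have hres := ih (q ++ [x]) _ hinv' hfresh' (List.nodup_cons.mp hnd).2
    simpa [List.append_assoc] using hres

lemma AInv_empty (priorities : List Int) : AInv priorities [] PySem.Dict.empty := by
  refine ⟨List.nodup_nil, fun p => ?_, fun p => ?_⟩
  · simp [PySem.Dict.keys, PySem.Dict.empty]
  · simp [PySem.Dict.getD, PySem.Dict.get?, PySem.Dict.empty]

lemma solBuild_fst (priorities : List Int) :
    (solBuild priorities).1 = PySem.List.pyRange 0 (priorities.length : Int) := by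
  have h := build_fold_inv priorities (PySem.List.pyRange 0 (priorities.length : Int)) []
    PySem.Dict.empty (AInv_empty priorities) (by simp) (PySem.List.nodup_pyRange_one _ _)
  simpa [solBuild] using h.1

lemma solBuild_inv (priorities : List Int) :
    AInv priorities (PySem.List.pyRange 0 (priorities.length : Int)) (solBuild priorities).2 := by
  have h := build_fold_inv priorities (PySem.List.pyRange 0 (priorities.length : Int)) []
    PySem.Dict.empty (AInv_empty priorities) (by simp) (PySem.List.nodup_pyRange_one _ _)
  simpa [solBuild] using h.2



lemma altLoop_eq (priorities : List Int) (location : Int) : ∀ (n : Nat) (q : List Int) (fuel : Nat) (r : Int) (k : Nat),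
    q.length = n → q.Nodup → location ∈ q → n ≤ fuel →
    PySem.List.index? (printOrderF priorities n q) location = some k →
    altLoop location fuel (q.map (fun i => (i, priAt priorities i))) r = r + (k : Int) + 1 := by
  intro n
  induction n using Nat.strong_induction_on with
  | _ n ih =>
    match n with
    | 0 =>
      intro q fuel r k hlen _ hloc _ _
      rw [List.length_eq_zero_iff.mp hlen] at hloc
      simp at hloc
    | N + 1 =>
      intro q fuel r k hlen hnd hloc hfuel hidx
      have hne : q ≠ [] := by intro hq; rw [hq] at hlen; simp at hlen
      obtain ⟨fuel', rfl⟩ : ∃ f', fuel = f' + 1 := ⟨fuel - 1, by omega⟩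
      rw [altLoop]
      have hjlt : jIdx priorities q < q.length := jIdx_lt priorities q hne
      have htop : ((PySem.List.max? (((q.map (fun i => (i, priAt priorities i))).map (fun x => x.2))) (fun p => p)).getD 0) = mTop priorities q := by
        rw [List.map_map]
        rfl
      rw [htop]
      have hjeq : ((q.map (fun i => (i, priAt priorities i))).findIdx (fun ip => ip.2 == mTop priorities q)) = jIdx priorities q := by
        rw [List.findIdx_map]
        rfl
      rw [hjeq]
      have hjmap : jIdx priorities q < (q.map (fun i => (i, priAt priorities i))).length := by
        rw [List.length_map]; exact hjlt
      have hget : PySem.List.pyGetD (q.map (fun i => (i, priAt priorities i))) ((jIdx priorities q : Nat) : Int) ((0 : Int), (0 : Int))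
          = (q[jIdx priorities q], priAt priorities (q[jIdx priorities q])) := by
        rw [PySem.List.pyGetD_natCast, List.getD_eq_getElem _ _ hjmap, List.getElem_map]
      rw [hget]
      have hpo := printOrderF_cons priorities N q hne
      have hgetD : q.getD (jIdx priorities q) 0 = q[jIdx priorities q] := List.getD_eq_getElem _ _ hjlt
      have hrotlen : (q.drop (jIdx priorities q + 1) ++ q.take (jIdx priorities q)).length = N := by
        have := rot_length priorities q hne; omega
      by_cases hqj : q[jIdx priorities q] = location
      · rw [hpo, hgetD, hqj, PySem.List.index?_cons_self] at hidx
        have hk0 : k = 0 := by simpa using hidx.symm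
        subst hk0
        simp [hqj]
      · have hcond : ((q[jIdx priorities q], priAt priorities (q[jIdx priorities q])).1 == location) = false := by
          simpa using hqj
        rw [hcond]
        simp only [Bool.false_eq_true, if_false]
        -- the index in the remaining print order
        rw [hpo, hgetD, PySem.List.index?_cons_of_ne _ hqj] at hidx
        obtain ⟨k', hk', rfl⟩ : ∃ k', PySem.List.index? (printOrderF priorities N (q.drop (jIdx priorities q + 1) ++ q.take (jIdx priorities q))) location = some k' ∧ k = k' + 1 := by
          rcases ho : PySem.List.index? (printOrderF priorities N (q.drop (jIdx priorities q + 1) ++ q.take (jIdx priorities q))) location with _ | k''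
          · rw [ho] at hidx; simp at hidx
          · rw [ho] at hidx
            simp only [Option.map_some, Option.some.injEq] at hidx
            exact ⟨k'', rfl, by omega⟩
        -- the rotated queue, mapped
        have hslice : (PySem.List.slice (q.map (fun i => (i, priAt priorities i))) (some (((jIdx priorities q : Nat) : Int) + 1)) none
              ++ PySem.List.slice (q.map (fun i => (i, priAt priorities i))) none (some ((jIdx priorities q : Nat) : Int)))
            = (q.drop (jIdx priorities q + 1) ++ q.take (jIdx priorities q)).map (fun i => (i, priAt priorities i)) := by
          have h1 : (((jIdx priorities q : Nat) : Int) + 1) = (((jIdx priorities q + 1 : Nat)) : Int) := by push_cast; ring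
          rw [h1, PySem.List.slice_from _ (by positivity), PySem.List.slice_to _ (by positivity)]
          simp [List.map_drop, List.map_take]
        rw [hslice]
        have hmemrot : location ∈ q.drop (jIdx priorities q + 1) ++ q.take (jIdx priorities q) := by
          have hq2 := q_decomp priorities q hne
          rw [hgetD] at hq2
          rw [hq2] at hloc
          rw [List.mem_append]
          rcases List.mem_append.mp hloc with h1 | h2
          · exact Or.inr h1
          · rcases List.mem_cons.mp h2 with h3 | h4
            · exact absurd h3.symm hqj
            · exact Or.inl h4
        have hndrot : (q.drop (jIdx priorities q + 1) ++ q.take (jIdx priorities q)).Nodup := by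
          have := ((perm_rot priorities q hne).nodup hnd)
          rw [hgetD] at this
          exact (List.nodup_cons.mp this).2
        rw [ih N (by omega) _ fuel' (r + 1) k' hrotlen hndrot hmemrot (by omega) hk']
        push_cast
        ring

-- ===== VERDICT (by name: the statement is the Claim_ definition above) =====
theorem solution_spec : Claim_equal_solution := by
  unfold Claim_equal_solution
  intro priorities location _hdom hpre
  unfold Spec_solution
  obtain ⟨hll, hlu⟩ := hpre
  have hq0len : (PySem.List.pyRange 0 (priorities.length : Int)).length = priorities.length := by
    rw [PySem.List.length_pyRange_one]; omega
  have hloc0 : location ∈ PySem.List.pyRange 0 (priorities.length : Int) := by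
    rw [PySem.List.mem_pyRange_one]; exact ⟨hll, hlu⟩
  have hsq : priorities.length * priorities.length ≤ (priorities.length + 1) * (priorities.length + 1) := by
    nlinarith
  have hA : solLoop priorities ((priorities.length + 1) * (priorities.length + 1))
        (PySem.List.pyRange 0 (priorities.length : Int)) (solBuild priorities).2 []
      = printOrderF priorities priorities.length (PySem.List.pyRange 0 (priorities.length : Int)) := by
    have := solLoop_eq priorities priorities.length (PySem.List.pyRange 0 (priorities.length : Int))
      (solBuild priorities).2 [] ((priorities.length + 1) * (priorities.length + 1))
      hq0len (solBuild_inv priorities) hsq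
    simpa using this
  have hperm := printOrderF_perm priorities priorities.length
    (PySem.List.pyRange 0 (priorities.length : Int)) hq0len
  have hmem : location ∈ printOrderF priorities priorities.length (PySem.List.pyRange 0 (priorities.length : Int)) :=
    hperm.symm.mem_iff.mp hloc0
  obtain ⟨k, hk⟩ := Option.isSome_iff_exists.mp ((PySem.List.index?_isSome_iff _ _).mpr hmem)
  have hAval : solution priorities location = (k : Int) + 1 := by
    show (match PySem.List.index? (solLoop priorities ((priorities.length + 1) * (priorities.length + 1))
        (solBuild priorities).1 (solBuild priorities).2 []) location with
      | some kk => (kk : Int) + 1 | none => 0) = (k : Int) + 1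
    rw [solBuild_fst, hA, hk]
  have henum : PySem.List.enumerate priorities
      = (PySem.List.pyRange 0 (priorities.length : Int)).map (fun i => (i, priAt priorities i)) := by
    rw [PySem.List.enumerate_eq_map_pyRange priorities 0]
    rfl
  have hBval : solution_alt priorities location = 0 + (k : Int) + 1 := by
    unfold solution_alt
    rw [henum]
    exact altLoop_eq priorities location priorities.length
      (PySem.List.pyRange 0 (priorities.length : Int)) (priorities.length + 1) 0 k
      hq0len (PySem.List.nodup_pyRange_one _ _) hloc0 (by omega) hk
  rw [hAval, hBval]
  ring
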